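-- pv_equiv track=rewrite | github.com/rolandotr/attack-tree-generation | Test/helpers.py | getMaxDegree
-- ===== SOURCE A (Python) =====
-- def getMaxDegree(G,E):
--     #FUNCTION to find the maximum degree and vertices with maximum degree
--     maxCount=0
--     maxDegree=[]
--     degrees=[]
--     sortedDegree=[]
--     for vertex in G:
--         count=0
--         for edge in E:
--             count+=edge.count(vertex)
--         degrees.append([vertex,count])
--         if (count>maxCount):
--             maxCount=count
--     degrees.sort(key = lambda x: x[1], reverse=True)
--     for vertex in G:
--         count=0
--         for edge in E:
--             count+=edge.count(vertex)
--         if (count==maxCount):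
--             maxDegree.append(vertex)
--     for degree in degrees:
--         sortedDegree.append(degree[0])
--     return (maxCount,sortedDegree)
-- ===== SOURCE B (Python) =====
-- def getMaxDegree(G, E):
--     # one pass over all edge entries builds a degree table, then a single keyed sort
--     counts = {}
--     for edge in E:
--         for v in edge:
--             counts[v] = counts.get(v, 0) + 1
--     maxCount = 0
--     for v in G:
--         c = counts.get(v, 0)
--         if c > maxCount:
--             maxCount = c
--     return (maxCount, sorted(G, key=lambda v: -counts.get(v, 0)))
-- ===== Notes on version B (the rewrite author's own statement) =====
-- stated objective: faster
-- what changed: replaces the per-vertex rescans of all edges (twice) with a single pass over the edge entries building a count dictionary, then one keyed sort of G instead of sorting vertex/count pairs and re-counting for the max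
import Mathlib
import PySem

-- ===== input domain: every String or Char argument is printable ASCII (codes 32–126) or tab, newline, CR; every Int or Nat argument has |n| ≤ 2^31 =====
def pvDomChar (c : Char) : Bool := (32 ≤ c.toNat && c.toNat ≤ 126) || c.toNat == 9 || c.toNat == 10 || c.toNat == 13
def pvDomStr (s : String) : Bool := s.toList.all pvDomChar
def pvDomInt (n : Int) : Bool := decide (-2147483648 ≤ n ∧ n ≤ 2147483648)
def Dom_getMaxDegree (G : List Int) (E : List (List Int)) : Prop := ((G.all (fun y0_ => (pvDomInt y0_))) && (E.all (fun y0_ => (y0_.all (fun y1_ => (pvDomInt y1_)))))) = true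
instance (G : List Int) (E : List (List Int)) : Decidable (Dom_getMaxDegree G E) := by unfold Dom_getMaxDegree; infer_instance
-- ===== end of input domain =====

-- B replaces A's repeated edge rescans with one counting pass over the edges plus a single keyed sort of G (faster).
-- ===== PORT A =====
def getMaxDegree (G : List Int) (E : List (List Int)) : Int × List Int :=
  let st := G.foldl (fun (st : Int × List (Int × Int)) vertex =>
      let count : Int := E.foldl (fun c edge => c + (PySem.List.count edge vertex : Int)) 0
      (if count > st.1 then count else st.1, st.2 ++ [(vertex, count)])) ((0 : Int), ([] : List (Int × Int)))
  let maxCount := st.1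
  let degrees := PySem.List.sorted st.2 (fun x => x.2) true
  -- A's second loop builds maxDegree, which A never returns; transliterated and discarded
  let _maxDegree := G.foldl (fun acc vertex =>
      let count : Int := E.foldl (fun c edge => c + (PySem.List.count edge vertex : Int)) 0
      if count = maxCount then acc ++ [vertex] else acc) ([] : List Int)
  let sortedDegree := degrees.foldl (fun acc d => acc ++ [d.1]) ([] : List Int)
  (maxCount, sortedDegree)

-- ===== PORT B =====
def getMaxDegree_alt (G : List Int) (E : List (List Int)) : Int × List Int :=
  let counts := E.foldl (fun d edge => edge.foldl (fun d v => d.insert v (d.getD v 0 + 1)) d)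
      (PySem.Dict.empty : PySem.Dict Int Int)
  let maxCount := G.foldl (fun m v => if counts.getD v 0 > m then counts.getD v 0 else m) (0 : Int)
  (maxCount, PySem.List.sorted G (fun v => -(counts.getD v 0)) false)

-- ===== PRECONDITION & SPEC =====
def Spec_getMaxDegree (G : List Int) (E : List (List Int)) (out : Int × List Int) : Prop := out = getMaxDegree_alt G E
instance (G : List Int) (E : List (List Int)) (out : Int × List Int) : Decidable (Spec_getMaxDegree G E out) := by unfold Spec_getMaxDegree; infer_instance

-- ===== CLAIM (what is proved, stated in full; the proofs are below) =====
def Claim_equal_getMaxDegree : Prop := ∀ (G : List Int) (E : List (List Int)), Dom_getMaxDegree G E → Spec_getMaxDegree G E (getMaxDegree G E)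

-- ===== LEMMAS AND PROOFS =====

/-- the degree of `v`: total number of occurrences of `v` across the edges -/
def pvCnt (E : List (List Int)) (v : Int) : Int := (E.map (fun e => (List.count v e : Int))).sum

theorem cntA_eq (E : List (List Int)) (v : Int) :
    E.foldl (fun c edge => c + (PySem.List.count edge v : Int)) 0 = pvCnt E v := by
  rw [PySem.List.foldl_add]
  simp [pvCnt, PySem.List.count_eq]

theorem countsB (E : List (List Int)) (d : PySem.Dict Int Int) (v : Int) :
    (E.foldl (fun d edge => edge.foldl (fun d x => d.insert x (d.getD x 0 + 1)) d) d).getD v 0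
      = d.getD v 0 + pvCnt E v := by
  induction E generalizing d with
  | nil => simp [pvCnt]
  | cons e t ih =>
      simp only [List.foldl_cons, ih, PySem.Dict.getD_foldl_insert_add_one, pvCnt, List.map_cons,
        List.sum_cons]
      ring

theorem foldl_pair (G : List Int) (cnt : Int → Int) (m : Int) (ds : List (Int × Int)) :
    G.foldl (fun (st : Int × List (Int × Int)) v =>
        (if cnt v > st.1 then cnt v else st.1, st.2 ++ [(v, cnt v)])) (m, ds)
      = (G.foldl (fun m v => if cnt v > m then cnt v else m) m,
         ds ++ G.map (fun v => (v, cnt v))) := by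
  induction G generalizing m ds with
  | nil => simp
  | cons g t ih => simp [ih]

theorem insertBy_map (cnt : Int → Int) (x : Int) (ys : List Int) :
    PySem.List.insertBy (fun a b : Int × Int => decide (b.2 < a.2)) (x, cnt x)
        (ys.map (fun v => (v, cnt v)))
      = (PySem.List.insertBy (fun a b : Int => decide (-(cnt a) < -(cnt b))) x ys).map
          (fun v => (v, cnt v)) := by
  induction ys with
  | nil => simp [PySem.List.insertBy]
  | cons y t ih =>
      simp only [List.map_cons, PySem.List.insertBy]
      by_cases h : cnt y < cnt x
      · simp [h, neg_lt_neg_iff]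
      · simp [h, ih, neg_lt_neg_iff]

theorem sorted_map_pair (G : List Int) (cnt : Int → Int) :
    PySem.List.sorted (G.map (fun v => (v, cnt v))) (fun x => x.2) true
      = (PySem.List.sorted G (fun v => -(cnt v)) false).map (fun v => (v, cnt v)) := by
  rw [PySem.List.sorted_rev_eq_foldl_insertBy, PySem.List.sorted_eq_foldl_insertBy,
    List.foldl_map]
  have h : ∀ (l : List Int) (acc : List Int),
      l.foldl (fun acc x =>
          PySem.List.insertBy (fun a b : Int × Int => decide (b.2 < a.2)) (x, cnt x) acc)
        (acc.map (fun v => (v, cnt v)))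
      = (l.foldl (fun acc x =>
          PySem.List.insertBy (fun a b : Int => decide (-(cnt a) < -(cnt b))) x acc) acc).map
          (fun v => (v, cnt v)) := by
    intro l
    induction l with
    | nil => intro acc; simp
    | cons x t ih =>
        intro acc
        simp only [List.foldl_cons, insertBy_map cnt x acc]
        exact ih _
  simpa using h G []

-- ===== VERDICT (by name: the statement is the Claim_ definition above) =====
theorem getMaxDegree_spec : Claim_equal_getMaxDegree := by
  intro G E _
  unfold Spec_getMaxDegree
  show getMaxDegree G E = getMaxDegree_alt G E
  simp only [getMaxDegree, getMaxDegree_alt, cntA_eq, countsB, PySem.Dict.getD_empty, zero_add,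
    foldl_pair, List.nil_append, PySem.List.foldl_append_singleton_eq_map]
  rw [sorted_map_pair]
  simp [List.map_map, Function.comp_def]
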